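-- pv_equiv track=rewrite | github.com/kashyap0729/good-will-hunting | services/donation-service/main.py | _calculate_tier_progression
-- ===== SOURCE A (Python) =====
-- def _calculate_tier_progression(total_points: int) -> str:
--     """Calculate tier based on total points"""
--     tier_thresholds = {
--         "Bronze": 0,
--         "Silver": 1000,
--         "Gold": 5000,
--         "Platinum": 15000,
--         "Diamond": 50000
--     }
--
--     for tier, threshold in sorted(tier_thresholds.items(), key=lambda x: x[1], reverse=True):
--         if total_points >= threshold:
--             return tier
--     return "Bronze"
-- ===== SOURCE B (Python) =====
-- def _calculate_tier_progression(total_points: int) -> str: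
--     """Calculate tier based on total points (count-then-index)."""
--     tiers = ["Bronze", "Silver", "Gold", "Platinum", "Diamond"]
--     cutoffs = [1000, 5000, 15000, 50000]
--     idx = sum(1 for c in cutoffs if total_points >= c)
--     return tiers[idx]
-- ===== Notes on version B (the rewrite author's own statement) =====
-- stated objective: simpler
-- what changed: Replaces A's dict build, sort-descending and early-return scan with a count-then-index: count how many ascending cutoffs the points reach and index into the tier list.
import Mathlib
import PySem

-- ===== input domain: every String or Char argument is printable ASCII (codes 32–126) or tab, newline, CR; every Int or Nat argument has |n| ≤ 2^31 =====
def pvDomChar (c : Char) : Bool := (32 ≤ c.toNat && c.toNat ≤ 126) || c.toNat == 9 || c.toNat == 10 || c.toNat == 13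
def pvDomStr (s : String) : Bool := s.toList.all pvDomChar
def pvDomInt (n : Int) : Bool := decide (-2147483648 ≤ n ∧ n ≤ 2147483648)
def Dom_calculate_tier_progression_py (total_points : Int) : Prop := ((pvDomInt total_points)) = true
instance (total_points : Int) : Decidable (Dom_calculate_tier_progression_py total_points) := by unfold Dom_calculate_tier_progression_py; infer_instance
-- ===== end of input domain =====

-- B replaces A's sort-descending-and-early-return scan by counting reached cutoffs and indexing a tier list (simpler decomposition).
-- ===== PORT A =====
-- early-return loop over the sorted (tier, threshold) pairs
def pvTierScan (pairs : List (String × Int)) (total_points : Int) : String :=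
  match pairs with
  | [] => "Bronze"
  | (tier, threshold) :: rest =>
      if total_points ≥ threshold then tier else pvTierScan rest total_points

def calculate_tier_progression_py (total_points : Int) : String :=
  let tier_thresholds : PySem.Dict String Int :=
    (((((PySem.Dict.empty.insert "Bronze" 0).insert "Silver" 1000).insert "Gold" 5000).insert "Platinum" 15000).insert "Diamond" 50000)
  pvTierScan (PySem.List.sorted (key := fun x => x.2) (reverse := true) tier_thresholds.items) total_points

-- ===== PORT B =====
def calculate_tier_progression_py_alt (total_points : Int) : String :=
  let tiers := ["Bronze", "Silver", "Gold", "Platinum", "Diamond"]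
  let cutoffs : List Int := [1000, 5000, 15000, 50000]
  let idx := (cutoffs.map (fun c => if total_points ≥ c then (1 : Int) else 0)).sum
  -- tiers[idx]: exact — 0 ≤ idx ≤ 4 < len(tiers), so Python's indexing never raises
  ((PySem.List.pyGet? tiers idx).getD "")

-- ===== PRECONDITION & SPEC =====
def Spec_calculate_tier_progression_py (total_points : Int) (out : String) : Prop := out = calculate_tier_progression_py_alt total_points
instance (total_points : Int) (out : String) : Decidable (Spec_calculate_tier_progression_py total_points out) := by unfold Spec_calculate_tier_progression_py; infer_instance

-- ===== CLAIM (what is proved, stated in full; the proofs are below) =====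
def Claim_equal_calculate_tier_progression_py : Prop := ∀ (total_points : Int), Dom_calculate_tier_progression_py total_points → Spec_calculate_tier_progression_py total_points (calculate_tier_progression_py total_points)

-- ===== LEMMAS AND PROOFS =====

-- ===== VERDICT (by name: the statement is the Claim_ definition above) =====
theorem calculate_tier_progression_py_spec : Claim_equal_calculate_tier_progression_py := by
  intro p _
  unfold Spec_calculate_tier_progression_py
  have hs : calculate_tier_progression_py p =
      pvTierScan [("Diamond", 50000), ("Platinum", 15000), ("Gold", 5000), ("Silver", 1000), ("Bronze", 0)] p := by
    unfold calculate_tier_progression_py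
    congr 1
  rw [hs]
  simp only [pvTierScan, calculate_tier_progression_py_alt, List.map, List.sum_cons, List.sum_nil,
    PySem.List.pyGet?]
  split_ifs <;> simp_all [PySem.List.pyIdx?] <;> omega
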